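-- pv_equiv track=rewrite | github.com/kurojs/Codewars | Python/7 kyu Dominant array elements/solve.py | solve
-- ===== SOURCE A (Python) =====
-- def solve(arr):
--     result = []
--     max_from_right = float('-inf')
--     for num in reversed(arr):
--         if num > max_from_right:
--             result.append(num)
--             max_from_right = num
--     return result[::-1]
-- ===== SOURCE B (Python) =====
-- def solve(arr):
--     n = len(arr)
--     suf = [float('-inf')] * n
--     for i in range(n - 2, -1, -1):
--         suf[i] = max(arr[i + 1], suf[i + 1])
--     return [a for a, s in zip(arr, suf) if a > s]
-- ===== Notes on version B (the rewrite author's own statement) =====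
-- stated objective: alternative
-- what changed: Replaces the fused reverse scan (running max + append + final reversal) with a precomputed suffix-maximum table built right-to-left and a separate forward filter arr[i] > suf[i], producing the result in natural order with no reversal.
import Mathlib
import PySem

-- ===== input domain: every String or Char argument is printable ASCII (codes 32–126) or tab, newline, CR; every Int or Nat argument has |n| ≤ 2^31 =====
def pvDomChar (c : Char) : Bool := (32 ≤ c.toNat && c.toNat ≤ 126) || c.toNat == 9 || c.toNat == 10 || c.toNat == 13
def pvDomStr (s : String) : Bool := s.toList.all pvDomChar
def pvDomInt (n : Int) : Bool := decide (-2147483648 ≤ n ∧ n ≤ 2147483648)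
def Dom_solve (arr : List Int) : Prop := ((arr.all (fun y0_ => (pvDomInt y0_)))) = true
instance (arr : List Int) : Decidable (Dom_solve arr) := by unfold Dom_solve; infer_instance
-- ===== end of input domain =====

-- B builds a suffix-maximum table right-to-left then filters forward; A fuses a reverse
-- scan with a running max and reverses at the end. Equal return values on all inputs.

-- ===== PORT A =====
-- running state: (result so far, max_from_right as Option Int; none = float('-inf'))
def solveStep (st : List Int × Option Int) (num : Int) : List Int × Option Int :=
  match st.2 with
  | none => (st.1 ++ [num], some num)
  | some m => if num > m then (st.1 ++ [num], some num) else st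

def solve (arr : List Int) : List Int :=
  ((arr.reverse).foldl solveStep ([], none)).1.reverse

-- ===== PORT B =====
-- 'a > s' where s may be float('-inf') (ported as none)
def gtO (a : Int) : Option Int → Bool
  | none => true
  | some m => decide (a > m)

-- the suffix-maximum table: entry i holds max of all later elements (none = -inf)
def sufMax : List Int → List (Option Int)
  | [] => []
  | [_] => [none]
  | _ :: y :: xs =>
    match sufMax (y :: xs) with
    | [] => []
    | s :: rest => (some (match s with | none => y | some m => max y m)) :: s :: rest

def solve_alt (arr : List Int) : List Int :=
  (arr.zip (sufMax arr)).filterMap (fun p => if gtO p.1 p.2 then some p.1 else none)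

-- ===== PRECONDITION & SPEC =====
def Spec_solve (arr : List Int) (out : List Int) : Prop := out = solve_alt arr
instance (arr : List Int) (out : List Int) : Decidable (Spec_solve arr out) := by unfold Spec_solve; infer_instance

-- ===== CLAIM (what is proved, stated in full; the proofs are below) =====
def Claim_equal_solve : Prop := ∀ (arr : List Int), Dom_solve arr → Spec_solve arr (solve arr)

-- ===== LEMMAS AND PROOFS =====

-- proof-only helper: the maximum of a list as an Option (none = -inf)
def maxO : List Int → Option Int
  | [] => none
  | x :: xs => some (match maxO xs with | none => x | some m => max x m)

def stepM (m : Option Int) (num : Int) : Option Int :=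
  match m with
  | none => some num
  | some v => if num > v then some num else m

lemma foldl_snd (l : List Int) : ∀ (res : List Int) (m : Option Int),
    (List.foldl solveStep (res, m) l).2 = List.foldl stepM m l := by
  induction l with
  | nil => intro res m; rfl
  | cons x xs ih =>
    intro res m
    cases m with
    | none => simpa [solveStep, stepM] using ih _ _
    | some v =>
      by_cases h : x > v <;> simp [solveStep, stepM, h, ih]

lemma foldl_stepM_reverse (xs : List Int) :
    List.foldl stepM none xs.reverse = maxO xs := by
  induction xs with
  | nil => rfl
  | cons x xs ih =>
    rw [List.reverse_cons, List.foldl_append, ih]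
    cases h : maxO xs with
    | none => simp [stepM, maxO, h]
    | some m =>
      by_cases hx : x > m
      · simp [stepM, maxO, h, hx, max_eq_left (le_of_lt hx)]
      · simp [stepM, maxO, h, hx, max_eq_right (not_lt.mp hx)]

lemma solve_cons (x : Int) (xs : List Int) :
    solve (x :: xs) = (if gtO x (maxO xs) then [x] else []) ++ solve xs := by
  unfold solve
  rw [List.reverse_cons, List.foldl_append]
  rcases hst : List.foldl solveStep (([] : List Int), (none : Option Int)) xs.reverse
    with ⟨r, m⟩
  have hm : m = maxO xs := by
    have h1 := foldl_snd xs.reverse ([] : List Int) none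
    rw [hst, foldl_stepM_reverse] at h1
    exact h1
  subst hm
  cases h : maxO xs with
  | none => simp [solveStep, gtO, List.foldl]
  | some v =>
    by_cases hx : x > v <;> simp [solveStep, gtO, hx, List.foldl]

lemma sufMax_cons (xs : List Int) : ∀ (x : Int),
    sufMax (x :: xs) = maxO xs :: sufMax xs := by
  induction xs with
  | nil => intro x; rfl
  | cons y ys ih =>
    intro x
    simp only [sufMax, ih y, maxO]

lemma solve_alt_cons (x : Int) (xs : List Int) :
    solve_alt (x :: xs) = (if gtO x (maxO xs) then [x] else []) ++ solve_alt xs := by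
  unfold solve_alt
  rw [sufMax_cons, List.zip_cons_cons, List.filterMap_cons]
  by_cases h : gtO x (maxO xs) <;> simp [h]

lemma solve_eq_alt (arr : List Int) : solve arr = solve_alt arr := by
  induction arr with
  | nil => rfl
  | cons x xs ih => rw [solve_cons, solve_alt_cons, ih]

-- ===== VERDICT (by name: the statement is the Claim_ definition above) =====
theorem solve_spec : Claim_equal_solve := by
  intro arr _
  exact solve_eq_alt arr
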